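/- GENERATED by mk_final_copies.py from the proof of the farm's unit `start_decoder.C8b` (farm:start_decoder.C8b.1: Proof.lean) as the
   re-elaboration sweep compiled it — do not edit. -/
import Vorbis.Spec.Units.start_decoder_C8b
import Vorbis.Spec.Worked.start_decoder_C8b_Lemmas

open X86 X86.User Asan Vorbis Vorbis.Spec Vorbis.Spec.StartDecoder

namespace Vorbis.Spec.start_decoder_C8b

/-- Segment C8b of `start_decoder` from its two stretches (`Lemmas.lean`): `c8b_walk1` takes `At8M1` (0x114a04) to the state after the
check of `c->sorted_entries` (`C8bMid`, 0x114a2f) or to `AtERR`; `c8b_walk2` takes `C8bMid` over the second `setup_malloc` to `At8M2`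
(0x114a47). -/
theorem c8b_seg (Lay : Layout) (hLay : Lay.hi = 0x1000000) (μ : Microarch) (hμ : UserX.MicroOK μ) (u₀ : State)
    (hcode : HasCodeNat Lay u₀ Vorbis.L.start_decoder.entry Vorbis.Code.code_start_decoder.nat Vorbis.L.start_decoder.size)
    (hld4 : Asan.SmallCheck Lay μ Vorbis.WayInv (Vorbis.CodeOK u₀) [.rax, .rcx, .rdx] 4 Vorbis.L.__asan_load4_noabort.entry)
    (hmalloc : ∀ (others : List Obj) (frames : List (Nat × FrameLayout)) (A : Arena), Calls Lay μ Vorbis.WayInv (Vorbis.conv u₀) Vorbis.L.setup_malloc.entry (Vorbis.Spec.setup_malloc.spec others frames A))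
    (hst8 : Asan.SmallCheck Lay μ Vorbis.WayInv (Vorbis.CodeOK u₀) [.rax, .rcx, .rdx] 8 Vorbis.L.__asan_store8_noabort.entry)
    (h_error : ∀ (others : List Obj) (frames : List (Nat × FrameLayout)), Calls Lay μ Vorbis.WayInv (Vorbis.conv u₀) Vorbis.L.error.entry (Vorbis.Spec.error.spec others frames)) :
    SegC8b Lay μ u₀ := by
  intro g i v hat
  -- 0x114a04 … 0x114a2f (line 3853–3854), or the stub 0x114ac9 … 0x114adb and the epilogue
  refine (c8b_walk1 Lay hLay μ hμ u₀ hcode hld4 hst8 h_error g i v hat).trans ?_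
  intro w hw
  rcases hw with hmid | herr
  · -- 0x114a2f … 0x114a47 (line 3857): the second allocator call
    refine (c8b_walk2 Lay hLay μ hμ u₀ hcode hmalloc g i w hmid).mono ?_
    intro x hx
    exact Or.inl hx
  · exact ReachVia.done (Or.inr herr)

end Vorbis.Spec.start_decoder_C8b

theorem Vorbis.Spec.Worked.start_decoder_C8b_ok : Vorbis.Spec.start_decoder_C8b.Statement := by
  unfold Vorbis.Spec.start_decoder_C8b.Statement
  intro Lay hLay μ hμ u₀ hcode hld4 hmalloc hst8 h_error
  exact Vorbis.Spec.start_decoder_C8b.c8b_seg Lay hLay μ hμ u₀ hcode hld4 hmalloc hst8 h_error
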